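-- pv_equiv track=rewrite | github.com/minhphan03/CodeSignal | Intro/Land of Logic/fileNaming.py | solution
-- ===== SOURCE A (Python) =====
-- def solution(names):
--     result = []
--     for i in names:
--         if i not in result:
--             result.append(i)
--         else:
--             k = 1
--             while i + "(" + str(k) + ")" in result:
--                 k +=1
--             else:
--                 result.append(i + "(" + str(k) + ")")
--     return result
-- ===== SOURCE B (Python) =====
-- def solution(names):
--     seen = set()
--     nxt = {}
--     result = []
--     for name in names:
--         if name not in seen:
--             seen.add(name)
--             result.append(name)
--         else:
--             k = nxt.get(name, 0) + 1
--             while name + "(" + str(k) + ")" in seen: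
--                 k += 1
--             nxt[name] = k
--             new = name + "(" + str(k) + ")"
--             seen.add(new)
--             result.append(new)
--     return result
-- ===== Notes on version B (the rewrite author's own statement) =====
-- stated objective: faster
-- what changed: Replaces A's repeated O(n) list-membership scans and the per-duplicate suffix search restarted from k=1 with a hash set for membership plus a dict remembering, per base name, the last suffix used, so each duplicate resumes its search where the previous one stopped.
import Mathlib
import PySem

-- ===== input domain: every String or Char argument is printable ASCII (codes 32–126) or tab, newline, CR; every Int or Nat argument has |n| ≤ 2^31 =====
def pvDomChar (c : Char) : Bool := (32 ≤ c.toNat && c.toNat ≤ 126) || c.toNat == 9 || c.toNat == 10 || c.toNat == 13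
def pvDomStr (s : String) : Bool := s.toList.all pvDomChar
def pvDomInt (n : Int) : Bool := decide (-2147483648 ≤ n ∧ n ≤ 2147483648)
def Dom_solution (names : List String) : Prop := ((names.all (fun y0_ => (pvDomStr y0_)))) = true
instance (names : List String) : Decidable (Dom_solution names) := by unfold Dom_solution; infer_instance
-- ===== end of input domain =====

-- B replaces A's list-membership scans and from-1 suffix search by a set plus a per-name
-- resume dict (asymptotically faster); return values proved equal on all inputs.

-- ===== PORT A =====
-- while i + "(" + str(k) + ")" in result: k += 1   (fuel result.length+1 only makes the
-- loop total; the proof shows it always suffices)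
def findA (i : String) (result : List String) : Int → Nat → Int
  | k, 0 => k
  | k, fuel+1 =>
    if i ++ "(" ++ PySem.Int.toStr k ++ ")" ∈ result then findA i result (k+1) fuel else k

def solution (names : List String) : List String :=
  names.foldl (fun result i =>
    if i ∉ result then
      result ++ [i]
    else
      let k := findA i result 1 (result.length + 1)
      result ++ [i ++ "(" ++ PySem.Int.toStr k ++ ")"]) []

-- ===== PORT B =====
-- while name + "(" + str(k) + ")" in seen: k += 1   (fuel seen.length+1 only makes the
-- loop total; the proof shows it always suffices)
def findB (name : String) (seen : PySem.Set String) : Int → Nat → Int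
  | k, 0 => k
  | k, fuel+1 =>
    if name ++ "(" ++ PySem.Int.toStr k ++ ")" ∈ seen then findB name seen (k+1) fuel else k

def stepB (st : PySem.Set String × PySem.Dict String Int × List String) (name : String) :
    PySem.Set String × PySem.Dict String Int × List String :=
  let seen := st.1
  let nxt := st.2.1
  let result := st.2.2
  if name ∉ seen then
    (seen.add name, nxt, result ++ [name])
  else
    let k := findB name seen (nxt.getD name 0 + 1) (seen.length + 1)
    let new := name ++ "(" ++ PySem.Int.toStr k ++ ")"
    (seen.add new, nxt.insert name k, result ++ [new])

def solution_alt (names : List String) : List String :=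
  (names.foldl stepB (PySem.Set.empty, PySem.Dict.empty, [])).2.2

-- ===== PRECONDITION & SPEC =====
def Spec_solution (names : List String) (out : List String) : Prop := out = solution_alt names
instance (names : List String) (out : List String) : Decidable (Spec_solution names out) := by unfold Spec_solution; infer_instance

-- ===== CLAIM (what is proved, stated in full; the proofs are below) =====
def Claim_equal_solution : Prop := ∀ (names : List String), Dom_solution names → Spec_solution names (solution names)

-- ===== LEMMAS AND PROOFS =====

-- decoding a decimal digit string, to show `Nat.toDigits 10` (hence str(k)) is injective
def decFrom (a : Nat) (cs : List Char) : Nat := cs.foldl (fun x c => x * 10 + (c.toNat - 48)) a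

theorem decFrom_digitChar_cons (a d : Nat) (hd : d < 10) (cs : List Char) :
    decFrom a (Nat.digitChar d :: cs) = decFrom (a * 10 + d) cs := by
  interval_cases d <;> rfl

theorem decFrom_toDigitsCore (fuel : Nat) : ∀ (n : Nat) (ds : List Char) (a : Nat),
    n ≤ fuel → ∃ e, decFrom a (Nat.toDigitsCore 10 (fuel + 1) n ds) = decFrom (a * 10 ^ e + n) ds := by
  induction fuel with
  | zero =>
    intro n ds a hn
    interval_cases n
    exact ⟨1, by simp [Nat.toDigitsCore, decFrom_digitChar_cons a 0 (by omega) ds]⟩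
  | succ fuel ih =>
    intro n ds a hn
    show ∃ e, decFrom a (Nat.toDigitsCore 10 (fuel + 1 + 1) n ds) = _
    by_cases h : n / 10 = 0
    · refine ⟨1, ?_⟩
      have hlt : n % 10 < 10 := Nat.mod_lt _ (by omega)
      have hn10 : n < 10 := by omega
      simp only [Nat.toDigitsCore, h, if_pos]
      rw [decFrom_digitChar_cons a (n % 10) hlt ds]
      have : n % 10 = n := Nat.mod_eq_of_lt hn10
      simp [this, pow_one]
    · have hrec : Nat.toDigitsCore 10 (fuel + 1 + 1) n ds
          = Nat.toDigitsCore 10 (fuel + 1) (n / 10) (Nat.digitChar (n % 10) :: ds) := by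
        simp only [Nat.toDigitsCore]
        simp [h]
      have hle : n / 10 ≤ fuel := by
        have := Nat.div_lt_self (by omega : 0 < n) (by omega : 1 < 10)
        omega
      obtain ⟨e, he⟩ := ih (n / 10) (Nat.digitChar (n % 10) :: ds) a hle
      refine ⟨e + 1, ?_⟩
      rw [hrec, he, decFrom_digitChar_cons _ (n % 10) (Nat.mod_lt _ (by omega)) ds]
      have : (a * 10 ^ e + n / 10) * 10 + n % 10 = a * 10 ^ (e + 1) + n := by
        rw [pow_succ]
        have := Nat.div_add_mod n 10
        ring_nf
        omega
      rw [this]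

theorem toDigits_inj (m n : Nat) (h : Nat.toDigits 10 m = Nat.toDigits 10 n) : m = n := by
  obtain ⟨e1, h1⟩ := decFrom_toDigitsCore m m [] 0 le_rfl
  obtain ⟨e2, h2⟩ := decFrom_toDigitsCore n n [] 0 le_rfl
  simp only [decFrom, List.foldl_nil, Nat.zero_mul, Nat.zero_add] at h1 h2
  have hmn : decFrom 0 (Nat.toDigits 10 m) = decFrom 0 (Nat.toDigits 10 n) := by rw [h]
  simp only [decFrom, Nat.toDigits] at hmn
  rw [h1, h2] at hmn
  exact hmn

theorem toStr_inj (k m : Int) (hk : 0 ≤ k) (hm : 0 ≤ m)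
    (h : PySem.Int.toStr k = PySem.Int.toStr m) : k = m := by
  have h' : PySem.Int.toChars k = PySem.Int.toChars m := by
    have := congrArg String.toList h
    simpa [PySem.Int.toStr, String.toList_ofList] using this
  simp only [PySem.Int.toChars, if_neg (by omega : ¬ k < 0), if_neg (by omega : ¬ m < 0)] at h'
  have := toDigits_inj k.toNat m.toNat h'
  omega

-- the candidate string i + "(" + str(k) + ")"
def cand (i : String) (k : Int) : String := i ++ "(" ++ PySem.Int.toStr k ++ ")"

theorem cand_inj (i : String) (k m : Int) (hk : 0 ≤ k) (hm : 0 ≤ m)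
    (h : cand i k = cand i m) : k = m := by
  unfold cand at h
  have h1 : PySem.Int.toStr k = PySem.Int.toStr m := by
    simpa [String.append_assoc] using h
  exact toStr_inj k m hk hm h1

-- pigeonhole: among |L|+1 distinct candidates one is not in L
theorem exists_free (L : List String) (i : String) (k0 : Int) (hk0 : 1 ≤ k0) :
    ∃ j : Nat, j ≤ L.length ∧ cand i (k0 + j) ∉ L := by
  by_contra hall
  push Not at hall
  have hnd : (List.map (fun j : Nat => cand i (k0 + (j : Int))) (List.range (L.length + 1))).Nodup := by
    refine List.Nodup.map_on ?_ List.nodup_range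
    intro a _ b _ hab
    have := cand_inj i (k0 + (a : Int)) (k0 + (b : Int)) (by omega) (by omega) hab
    omega
  have hsub : (List.map (fun j : Nat => cand i (k0 + (j : Int))) (List.range (L.length + 1))) ⊆ L := by
    intro x hx
    rw [List.mem_map] at hx
    obtain ⟨j, hj, rfl⟩ := hx
    exact hall j (Nat.lt_succ_iff.mp (List.mem_range.mp hj))
  have := (hnd.subperm hsub).length_le
  simp at this

-- characterisation of the while-loop: result is the least free k ≥ start (given enough fuel)
theorem findA_spec (i : String) (L : List String) : ∀ (fuel : Nat) (k0 : Int),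
    (∃ j : Nat, j < fuel ∧ cand i (k0 + j) ∉ L) →
    cand i (findA i L k0 fuel) ∉ L ∧ k0 ≤ findA i L k0 fuel ∧
      ∀ m, k0 ≤ m → m < findA i L k0 fuel → cand i m ∈ L := by
  intro fuel
  induction fuel with
  | zero => intro k0 ⟨j, hj, _⟩; omega
  | succ fuel ih =>
    intro k0 hex
    obtain ⟨j, hj, hfree⟩ := hex
    have hstep : findA i L k0 (fuel + 1) = if cand i k0 ∈ L then findA i L (k0 + 1) fuel else k0 := rfl
    by_cases h : cand i k0 ∈ L
    · rw [hstep, if_pos h]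
      have hj0 : j ≠ 0 := by
        rintro rfl
        exact hfree (by simpa using h)
      have hex' : ∃ j' : Nat, j' < fuel ∧ cand i (k0 + 1 + (j' : Int)) ∉ L := by
        refine ⟨j - 1, by omega, ?_⟩
        have hcast : k0 + 1 + ((j - 1 : Nat) : Int) = k0 + (j : Int) := by omega
        rw [hcast]; exact hfree
      obtain ⟨h1, h2, h3⟩ := ih (k0 + 1) hex'
      refine ⟨h1, by omega, ?_⟩
      intro m hm1 hm2
      rcases eq_or_lt_of_le hm1 with rfl | hlt
      · exact h
      · exact h3 m (by omega) hm2
    · rw [hstep, if_neg h]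
      exact ⟨h, le_rfl, fun m h1 h2 => absurd h2 (by omega)⟩

theorem findB_eq_findA (name : String) (L : List String) : ∀ (fuel : Nat) (k : Int),
    findB name L k fuel = findA name L k fuel := by
  intro fuel
  induction fuel with
  | zero => intro k; rfl
  | succ fuel ih =>
    intro k
    have h1 : findB name L k (fuel + 1) = if cand name k ∈ L then findB name L (k + 1) fuel else k := rfl
    have h2 : findA name L k (fuel + 1) = if cand name k ∈ L then findA name L (k + 1) fuel else k := rfl
    rw [h1, h2, ih]

-- the least free suffix is unique even when the searches start at different points,
-- provided every point skipped by the later start is occupied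
theorem least_unique (L : List String) (i : String) (b r1 r2 : Int)
    (hb : 1 ≤ b)
    (hf1 : cand i r1 ∉ L) (hlo1 : 1 ≤ r1) (hmin1 : ∀ m, 1 ≤ m → m < r1 → cand i m ∈ L)
    (hf2 : cand i r2 ∉ L) (hlo2 : b ≤ r2) (hmin2 : ∀ m, b ≤ m → m < r2 → cand i m ∈ L)
    (hskip : ∀ m, 1 ≤ m → m < b → cand i m ∈ L) : r1 = r2 := by
  rcases lt_trichotomy r1 r2 with h | h | h
  · rcases lt_or_ge r1 b with hb1 | hb1
    · exact absurd (hskip r1 hlo1 hb1) hf1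
    · exact absurd (hmin2 r1 hb1 h) hf1
  · exact h
  · exact absurd (hmin1 r2 (by omega) h) hf2

-- the loop invariant tying A's result list to B's (seen, nxt, result) state
def LoopInv (resA : List String) (st : PySem.Set String × PySem.Dict String Int × List String) : Prop :=
  st.2.2 = resA ∧
  (∀ x, x ∈ st.1 ↔ x ∈ resA) ∧
  (∀ name v, st.2.1.get? name = some v →
    1 ≤ v ∧ ∀ j : Int, 1 ≤ j → j ≤ v → cand name j ∈ resA)

theorem LoopInv_step (resA : List String) (st : PySem.Set String × PySem.Dict String Int × List String)
    (i : String) (h : LoopInv resA st) :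
    LoopInv (if i ∉ resA then resA ++ [i]
         else resA ++ [i ++ "(" ++ PySem.Int.toStr (findA i resA 1 (resA.length + 1)) ++ ")"])
        (stepB st i) := by
  obtain ⟨seen, nxt, resB⟩ := st
  obtain ⟨hres, hmem, hnxt⟩ := h
  simp only at hres hmem hnxt
  subst hres
  by_cases hi : i ∈ resB
  · -- duplicate branch on both sides
    have hiA : ¬ i ∉ resB := by simpa using hi
    have hiB : i ∈ seen := (hmem i).mpr hi
    simp only [if_neg hiA, stepB, if_neg (show ¬ i ∉ seen from fun hc => hc hiB)]
    -- A's found suffix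
    obtain ⟨jA, hjA, hfA⟩ := exists_free resB i 1 le_rfl
    have specA := findA_spec i resB (resB.length + 1) 1 ⟨jA, by omega, hfA⟩
    set rA := findA i resB 1 (resB.length + 1) with hrA
    -- B's found suffix
    have hb1 : 1 ≤ nxt.getD i 0 + 1 := by
      rcases h : nxt.get? i with _ | v
      · simp [PySem.Dict.getD_eq_get?_getD, h]
      · have := (hnxt i v h).1
        simp [PySem.Dict.getD_eq_get?_getD, h]; omega
    obtain ⟨jB, hjB, hfB⟩ := exists_free seen i (nxt.getD i 0 + 1) hb1
    have hfB' : cand i (nxt.getD i 0 + 1 + jB) ∉ seen := hfB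
    have specB := findA_spec i seen (seen.length + 1) (nxt.getD i 0 + 1) ⟨jB, by omega, hfB'⟩
    rw [findB_eq_findA]
    set rB := findA i seen (nxt.getD i 0 + 1) (seen.length + 1) with hrB
    -- transfer B's characterisation to membership in resB
    have hskip : ∀ m : Int, 1 ≤ m → m < nxt.getD i 0 + 1 → cand i m ∈ resB := by
      intro m h1 h2
      rcases h : nxt.get? i with _ | v
      · simp [PySem.Dict.getD_eq_get?_getD, h] at h2; omega
      · obtain ⟨hv1, hv2⟩ := hnxt i v h
        have : m ≤ v := by simp [PySem.Dict.getD_eq_get?_getD, h] at h2; omega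
        exact hv2 m h1 this
    have hreq : rA = rB := by
      refine least_unique resB i (nxt.getD i 0 + 1) rA rB hb1 specA.1 specA.2.1 specA.2.2 ?_ specB.2.1 ?_ hskip
      · exact fun hmem' => specB.1 ((hmem _).mpr hmem')
      · intro m h1 h2
        exact (hmem _).mp (specB.2.2 m h1 h2)
    refine ⟨by simp [hreq], ?_, ?_⟩
    · intro x
      rw [PySem.Set.mem_add]
      simp only [List.mem_append, List.mem_singleton, hmem x, hreq]
    · intro name v hv
      by_cases hn : name = i
      · subst hn
        rw [PySem.Dict.get?_insert_self] at hv
        obtain rfl : v = rB := by injection hv with h; exact h.symm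
        refine ⟨by omega, ?_⟩
        intro j hj1 hj2
        rcases eq_or_lt_of_le hj2 with rfl | hlt
        · rw [← hreq]; simp [cand]
        · rcases lt_or_ge j (nxt.getD name 0 + 1) with hc | hc
          · exact List.mem_append_left _ (hskip j hj1 hc)
          · exact List.mem_append_left _ ((hmem _).mp (specB.2.2 j hc hlt))
      · rw [PySem.Dict.get?_insert_of_ne _ _ hn] at hv
        obtain ⟨h1, h2⟩ := hnxt name v hv
        exact ⟨h1, fun j hj1 hj2 => List.mem_append_left _ (h2 j hj1 hj2)⟩
  · -- fresh-name branch on both sides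
    have hiB : i ∉ seen := fun hc => hi ((hmem i).mp hc)
    simp only [if_pos hi, stepB, if_pos hiB]
    refine ⟨rfl, ?_, ?_⟩
    · intro x
      rw [PySem.Set.mem_add]
      simp only [List.mem_append, List.mem_singleton, hmem x]
    · intro name v hv
      obtain ⟨h1, h2⟩ := hnxt name v hv
      exact ⟨h1, fun j hj1 hj2 => List.mem_append_left _ (h2 j hj1 hj2)⟩

theorem LoopInv_foldl (names : List String) :
    ∀ (resA : List String) (st : PySem.Set String × PySem.Dict String Int × List String),
    LoopInv resA st →
    LoopInv (names.foldl (fun result i =>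
          if i ∉ result then result ++ [i]
          else result ++ [i ++ "(" ++ PySem.Int.toStr (findA i result 1 (result.length + 1)) ++ ")"]) resA)
        (names.foldl stepB st) := by
  induction names with
  | nil => intro resA st h; exact h
  | cons n t ih =>
    intro resA st h
    exact ih _ _ (LoopInv_step resA st n h)

-- ===== VERDICT (by name: the statement is the Claim_ definition above) =====
theorem solution_spec : Claim_equal_solution := by
  intro names _
  unfold Spec_solution solution solution_alt
  have h0 : LoopInv [] (PySem.Set.empty, PySem.Dict.empty, []) := by
    refine ⟨rfl, ?_, ?_⟩
    · intro x; simp [PySem.Set.empty]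
    · intro name v hv; simp [PySem.Dict.get?_empty] at hv
  exact ((LoopInv_foldl names [] _ h0).1).symm
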